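-- pv_equiv track=rewrite | github.com/FTDfangge/leetcode | production/leetcode/medium/954_can_recorder_doubled.py | count_and_del_zero
-- ===== SOURCE A (Python) =====
-- from typing import List
--
-- def count_and_del_zero(l:List[int]) -> int:
--     count = 0
--     i=0
--     while i in range(l.__len__()):
--         if l[i] == 0:
--             l.remove(0)
--             count += 1
--             continue
--         else:
--             i += 1
--     return count
-- ===== SOURCE B (Python) =====
-- from typing import List
--
-- def count_and_del_zero(l: List[int]) -> int:
--     w = 0
--     for x in l:
--         if x != 0:
--             l[w] = x
--             w += 1
--     count = len(l) - w
--     del l[w:]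
--     return count
-- ===== Notes on version B (the rewrite author's own statement) =====
-- stated objective: faster
-- what changed: Replaced the while-loop that calls l.remove(0) (a linear scan per zero) with a single-pass in-place two-pointer compaction: non-zeros are written forward at index w, the tail is deleted once, and the count is len(l)-w.
import Mathlib
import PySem

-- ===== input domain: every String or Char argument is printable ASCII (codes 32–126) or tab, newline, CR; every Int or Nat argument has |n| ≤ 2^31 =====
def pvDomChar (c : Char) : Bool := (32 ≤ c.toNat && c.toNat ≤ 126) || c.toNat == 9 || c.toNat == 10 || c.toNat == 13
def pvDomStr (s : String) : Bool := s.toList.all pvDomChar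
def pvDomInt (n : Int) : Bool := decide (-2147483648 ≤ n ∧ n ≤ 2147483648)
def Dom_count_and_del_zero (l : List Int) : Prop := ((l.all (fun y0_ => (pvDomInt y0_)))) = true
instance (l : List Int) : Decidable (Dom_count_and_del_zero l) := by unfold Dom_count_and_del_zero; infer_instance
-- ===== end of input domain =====

-- B replaces A's quadratic remove(0)-per-zero loop by a one-pass in-place compaction (faster);
-- equivalence proved is about the RETURN value; the Python B performs the same net mutation of l.

-- ===== PORT A =====
-- the while loop of A: state is the current list, the index i and count; l.remove(0) is
-- PySem.List.remove? (it never fails here since l[i] == 0, so .getD l is never used).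
def count_and_del_zero_loop (l : List Int) (i : Nat) (count : Int) : Int :=
  if h : i < l.length then
    if l[i] = 0 then
      count_and_del_zero_loop ((PySem.List.remove? l 0).getD l) i (count + 1)
    else
      count_and_del_zero_loop l (i + 1) count
  else
    count
termination_by l.length - i
decreasing_by
  · have hm : (0 : Int) ∈ l := by
      rename_i h0; exact h0 ▸ List.getElem_mem h
    rw [PySem.List.remove?_eq_some_erase l 0 hm, Option.getD_some,
        List.length_erase_of_mem hm]
    omega
  · omega

def count_and_del_zero (l : List Int) : Int :=
  count_and_del_zero_loop l 0 0

-- ===== PORT B =====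
-- single pass: w = number of kept (non-zero) elements; result is len(l) - w.
def count_and_del_zero_alt (l : List Int) : Int :=
  let w := l.foldl (fun w x => if x ≠ 0 then w + 1 else w) (0 : Int)
  (l.length : Int) - w

-- ===== PRECONDITION & SPEC =====
def Spec_count_and_del_zero (l : List Int) (out : Int) : Prop := out = count_and_del_zero_alt l
instance (l : List Int) (out : Int) : Decidable (Spec_count_and_del_zero l out) := by unfold Spec_count_and_del_zero; infer_instance

-- ===== CLAIM (what is proved, stated in full; the proofs are below) =====
def Claim_equal_count_and_del_zero : Prop := ∀ (l : List Int), Dom_count_and_del_zero l → Spec_count_and_del_zero l (count_and_del_zero l)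

-- ===== LEMMAS AND PROOFS =====

-- A's loop returns count plus the number of zeros in the unscanned suffix,
-- provided all already-scanned elements (indices < i) are non-zero.
theorem count_and_del_zero_loop_eq (l : List Int) (i : Nat) (count : Int)
    (hpre : ∀ j, j < i → ∀ (hj : j < l.length), l[j] ≠ 0) :
    count_and_del_zero_loop l i count
      = count + (((l.drop i).countP (fun x => x == 0) : Nat) : Int) := by
  induction l, i, count using count_and_del_zero_loop.induct with
  | case1 l i count h h0 ih =>
    -- l[i] = 0 : the first 0 of l is at index i, so remove drops exactly l[i]
    have hm : (0 : Int) ∈ l := h0 ▸ List.getElem_mem h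
    have htake : (0 : Int) ∉ l.take i := by
      intro hmem
      obtain ⟨j, hj, hjl⟩ := List.mem_take_iff_getElem.mp hmem
      exact hpre j (by omega) (by omega) hjl
    have hsplit : l = l.take i ++ (0 :: l.drop (i + 1)) := by
      conv_lhs => rw [← List.take_append_drop i l]
      rw [List.drop_eq_getElem_cons h, h0]
    have herase : l.erase 0 = l.take i ++ l.drop (i + 1) := by
      conv_lhs => rw [hsplit]
      rw [List.erase_append_right _ htake, List.erase_cons_head]
    have hlen : (l.take i).length = i := by
      simp [List.length_take]; omega
    have hrem : (PySem.List.remove? l 0).getD l = l.take i ++ l.drop (i + 1) := by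
      rw [PySem.List.remove?_eq_some_erase l 0 hm, Option.getD_some, herase]
    rw [count_and_del_zero_loop, dif_pos h, if_pos h0]
    rw [hrem] at ih ⊢
    rw [ih ?newpre]
    case newpre =>
      intro j hj hjl
      have hjt : j < (l.take i).length := by omega
      have : (l.take i ++ l.drop (i + 1))[j] = (l.take i)[j] :=
        List.getElem_append_left hjt
      rw [this, List.getElem_take]
      exact hpre j hj (by omega)
    have hdrop : (l.take i ++ l.drop (i + 1)).drop i = l.drop (i + 1) := by
      have hd := List.drop_left (l₁ := l.take i) (l₂ := l.drop (i + 1))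
      rw [hlen] at hd
      exact hd
    rw [hdrop]
    have : l.drop i = 0 :: l.drop (i + 1) := by
      rw [List.drop_eq_getElem_cons h, h0]
    rw [this, List.countP_cons]
    simp
    ring
  | case2 l i count h h0 ih =>
    -- l[i] ≠ 0 : advance i
    rw [count_and_del_zero_loop, dif_pos h, if_neg h0]
    rw [ih ?newpre]
    case newpre =>
      intro j hj hjl
      rcases Nat.lt_or_ge j i with hji | hji
      · exact hpre j hji hjl
      · have : j = i := by omega
        subst this; simpa using h0
    have : l.drop i = l[i] :: l.drop (i + 1) := List.drop_eq_getElem_cons h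
    rw [this, List.countP_cons]
    simp [h0]
  | case3 l i count h =>
    rw [count_and_del_zero_loop, dif_neg h]
    rw [List.drop_eq_nil_of_le (by omega)]
    simp

-- B's fold counts the non-zero elements.
theorem foldl_count_nonzero (l : List Int) (a : Int) :
    l.foldl (fun w x => if x ≠ 0 then w + 1 else w) a
      = a + ((l.countP (fun x => !(x == 0)) : Nat) : Int) := by
  induction l generalizing a with
  | nil => simp
  | cons x xs ih =>
    rw [List.foldl_cons, ih, List.countP_cons]
    by_cases hx : x = 0
    · simp [hx]
    · simp [hx]; ring

-- ===== VERDICT (by name: the statement is the Claim_ definition above) =====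
theorem count_and_del_zero_spec : Claim_equal_count_and_del_zero := by
  intro l _
  unfold Spec_count_and_del_zero count_and_del_zero count_and_del_zero_alt
  rw [count_and_del_zero_loop_eq l 0 0 (by intro j hj; omega)]
  rw [foldl_count_nonzero]
  have hsum := List.length_eq_countP_add_countP (fun x : Int => x == 0) (l := l)
  have hcong : l.countP (fun x => !(x == 0))
      = l.countP (fun a => decide ¬((fun x : Int => x == 0) a = true)) := by
    apply List.countP_congr
    intro x _
    by_cases hx : x = 0 <;> simp [hx]
  simp only [List.drop_zero, zero_add]
  rw [hcong]
  push_cast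
  omega
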